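-- pv_equiv track=rewrite | github.com/maaku/python-bitcoin | bitcoin/compress.py | compress_amount
-- ===== SOURCE A (Python) =====
-- def compress_amount(n):
--     """Compress 64-bit integer values, preferring a smaller size for whole
--     numbers (base-10), so as to achieve run-length encoding gains on real-world
--     data. The basic algorithm:
--         * if the amount is 0, return 0
--         * divide the amount (in base units) by the largest power of 10
--           possible; call the exponent e (e is max 9)
--         * if e<9, the last digit of the resulting number cannot be 0; store it
--           as d, and drop it (divide by 10); regardless, call the result n
--         * output 1 + 10*(9*n + d - 1) + e
--         * if e==9, we only know the resulting number is not zero, so output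
--           1 + 10*(n - 1) + 9
--     (this is decodable, as d is in [1-9] and e is in [0-9])"""
--     if not n: return 0
--     e = 0
--     while (n % 10) == 0 and e < 9:
--         n = n // 10
--         e = e + 1
--     if e < 9:
--         n, d = divmod(n, 10);
--         return 1 + (n*9 + d - 1)*10 + e
--     else:
--         return 1 + (n - 1)*10 + 9
-- ===== SOURCE B (Python) =====
-- def compress_amount(n):
--     if n == 0:
--         return 0
--     s = str(n)
--     e = min(len(s) - len(s.rstrip('0')), 9)
--     m = n // 10 ** e
--     if e == 9:
--         return 10 * m
--     return 9 * m + m % 10 + e - 9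
-- ===== Notes on version B (the rewrite author's own statement) =====
-- stated objective: idiomatic
-- what changed: A strips trailing zeros with a repeated-division loop and then packs via divmod; B reads the exponent off the decimal string (len(str(n)) minus len of str(n).rstrip('0')), does a single division by 10**e, and packs with direct closed formulas 9*m + m%10 + e - 9 (e<9) and 10*m (e==9) with no divmod and no loop.
import Mathlib
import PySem

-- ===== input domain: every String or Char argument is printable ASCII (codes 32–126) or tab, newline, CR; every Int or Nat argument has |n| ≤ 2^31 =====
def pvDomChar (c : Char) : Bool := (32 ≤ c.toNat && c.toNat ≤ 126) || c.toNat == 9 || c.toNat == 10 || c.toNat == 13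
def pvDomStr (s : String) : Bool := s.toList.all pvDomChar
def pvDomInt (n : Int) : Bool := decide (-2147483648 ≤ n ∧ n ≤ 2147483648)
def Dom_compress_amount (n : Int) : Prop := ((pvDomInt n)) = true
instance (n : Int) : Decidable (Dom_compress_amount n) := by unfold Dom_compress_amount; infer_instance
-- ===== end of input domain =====

-- B computes the trailing-zero exponent from the decimal string (str/rstrip) instead of A's
-- repeated-division loop, and packs with direct closed formulas (9*m + m%10 + e - 9 / 10*m)
-- instead of A's divmod-based branch (idiomatic alternative; same cost).


-- ===== PORT A =====
-- A's while loop: '(n % 10) == 0 and e < 9'; the fuel argument is only a termination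
-- device (it is always 9 - e, so it never cuts the loop short).
def caLoop : Int → Int → Nat → Int × Int
  | n, e, 0 => (n, e)
  | n, e, f + 1 =>
    if PySem.Int.mod n 10 = 0 ∧ e < 9 then caLoop (PySem.Int.floordiv n 10) (e + 1) f
    else (n, e)

def compress_amount (n : Int) : Int :=
  if n = 0 then 0
  else
    let p := caLoop n 0 9
    let n1 := p.1
    let e := p.2
    if e < 9 then
      let q := PySem.Int.floordiv n1 10
      let d := PySem.Int.mod n1 10
      1 + (q * 9 + d - 1) * 10 + e
    else
      1 + (n1 - 1) * 10 + 9

-- ===== PORT B =====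
-- hand port of s.rstrip('0') (PySem has rstrip only for whitespace): drop the trailing
-- '0' characters — exact, character for character.
def rstrip0 (cs : List Char) : List Char := (cs.reverse.dropWhile (fun c => c == '0')).reverse

def compress_amount_alt (n : Int) : Int :=
  if n = 0 then 0
  else
    let s := PySem.Int.toChars n            -- s = str(n), as its list of characters
    let e : Int := min ((s.length : Int) - ((rstrip0 s).length : Int)) 9
    let m := PySem.Int.floordiv n (10 ^ e.toNat)   -- n // 10**e  (e ≥ 0, so 10**e = 10^e.toNat)
    if e = 9 then 10 * m
    else 9 * m + PySem.Int.mod m 10 + e - 9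

-- ===== PRECONDITION & SPEC =====
def Spec_compress_amount (n : Int) (out : Int) : Prop := out = compress_amount_alt n
instance (n : Int) (out : Int) : Decidable (Spec_compress_amount n out) := by unfold Spec_compress_amount; infer_instance

-- ===== CLAIM (what is proved, stated in full; the proofs are below) =====
def Claim_equal_compress_amount : Prop := ∀ (n : Int), Dom_compress_amount n → Spec_compress_amount n (compress_amount n)

-- ===== LEMMAS AND PROOFS =====

-- trailing-'0' count of a character list (what len(s) - len(s.rstrip('0')) measures)
def tz (cs : List Char) : Nat := (cs.reverse.takeWhile (fun c => c == '0')).length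

lemma len_sub_rstrip0 (cs : List Char) : cs.length - (rstrip0 cs).length = tz cs := by
  have h := congrArg List.length
    (List.takeWhile_append_dropWhile (p := fun c => c == '0') (l := cs.reverse))
  simp only [List.length_append, List.length_reverse] at h
  simp only [rstrip0, tz, List.length_reverse]
  omega

lemma rstrip0_len_le (cs : List Char) : (rstrip0 cs).length ≤ cs.length := by
  simp only [rstrip0, List.length_reverse]
  have := List.length_dropWhile_le (p := fun c => c == '0') (l := cs.reverse)
  simpa using this

-- toDigitsCore: the accumulator is appended on the right
lemma tdc_acc : ∀ (f n : Nat) (ds : List Char),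
    Nat.toDigitsCore 10 f n ds = Nat.toDigitsCore 10 f n [] ++ ds := by
  intro f
  induction f with
  | zero => intro n ds; simp [Nat.toDigitsCore]
  | succ f ih =>
    intro n ds
    simp only [Nat.toDigitsCore]
    by_cases h : n / 10 = 0
    · simp [h]
    · simp only [h]
      rw [ih (n / 10) ((n % 10).digitChar :: ds), ih (n / 10) [(n % 10).digitChar]]
      simp

-- toDigitsCore does not depend on the fuel once the fuel exceeds n
lemma tdc_fuel : ∀ (f f' n : Nat) (ds : List Char), n < f → n < f' →
    Nat.toDigitsCore 10 f n ds = Nat.toDigitsCore 10 f' n ds := by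
  intro f
  induction f with
  | zero => intro f' n ds h _; omega
  | succ f ih =>
    intro f' n ds h h'
    cases f' with
    | zero => omega
    | succ f' =>
      simp only [Nat.toDigitsCore]
      by_cases hz : n / 10 = 0
      · simp [hz]
      · simp only [hz]
        have hn : 0 < n := by
          rcases Nat.eq_zero_or_pos n with h0 | h0
          · exact absurd (by simp [h0]) hz
          · exact h0
        have hlt : n / 10 < n := Nat.div_lt_self hn (by norm_num)
        exact ih f' (n / 10) _ (by omega) (by omega)

lemma dig_small (m : Nat) (h : m < 10) : Nat.toDigits 10 m = [Nat.digitChar m] := by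
  simp [Nat.toDigits, Nat.toDigitsCore, Nat.div_eq_of_lt h, Nat.mod_eq_of_lt h]

lemma dig_step (m : Nat) (h : 10 ≤ m) :
    Nat.toDigits 10 m = Nat.toDigits 10 (m / 10) ++ [Nat.digitChar (m % 10)] := by
  have hz : m / 10 ≠ 0 := by
    intro hc; have := Nat.div_eq_of_lt (show m < 10 by omega); omega
  have h1 : Nat.toDigits 10 m = Nat.toDigitsCore 10 m (m / 10) [(m % 10).digitChar] := by
    simp only [Nat.toDigits, Nat.toDigitsCore]
    rw [if_neg hz]
  have hlt : m / 10 < m := Nat.div_lt_self (by omega) (by norm_num)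
  rw [h1, tdc_acc m (m / 10) [(m % 10).digitChar],
    tdc_fuel m (m / 10 + 1) (m / 10) [] (by omega) (by omega)]
  rfl

lemma digitChar_ne_zero (r : Nat) (h1 : r < 10) (h2 : r ≠ 0) :
    (Nat.digitChar r == '0') = false := by
  interval_cases r <;> simp_all <;> decide

lemma tz_not_dvd (m : Nat) (h0 : m ≠ 0) (h : m % 10 ≠ 0) : tz (Nat.toDigits 10 m) = 0 := by
  rcases Nat.lt_or_ge m 10 with hm | hm
  · rw [dig_small m hm]
    simp [tz, digitChar_ne_zero m hm h0]
  · rw [dig_step m hm]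
    simp [tz, digitChar_ne_zero (m % 10) (Nat.mod_lt m (by norm_num)) h]

lemma tz_dvd (m : Nat) (h0 : m ≠ 0) (h : m % 10 = 0) :
    tz (Nat.toDigits 10 m) = tz (Nat.toDigits 10 (m / 10)) + 1 := by
  have hm : 10 ≤ m := by
    rcases Nat.lt_or_ge m 10 with h' | h'
    · exact absurd (Nat.mod_eq_of_lt h' ▸ h) h0
    · exact h'
  rw [dig_step m hm, h]
  simp [tz, Nat.digitChar]

lemma dig_ne_nil (m : Nat) : Nat.toDigits 10 m ≠ [] := by
  rcases Nat.lt_or_ge m 10 with hm | hm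
  · rw [dig_small m hm]; simp
  · rw [dig_step m hm]; simp

lemma tz_lt_len (m : Nat) (h0 : m ≠ 0) : tz (Nat.toDigits 10 m) < (Nat.toDigits 10 m).length := by
  induction m using Nat.strong_induction_on with
  | _ m ih =>
    by_cases h : m % 10 = 0
    · have hm : 10 ≤ m := by
        rcases Nat.lt_or_ge m 10 with h' | h'
        · exact absurd (Nat.mod_eq_of_lt h' ▸ h) h0
        · exact h'
      have hz : m / 10 ≠ 0 := by
        intro hc; have := Nat.div_eq_of_lt (show m < 10 by omega); omega
      have hlt : m / 10 < m := Nat.div_lt_self (by omega) (by norm_num)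
      have := ih (m / 10) hlt hz
      rw [tz_dvd m h0 h, dig_step m hm]
      simp only [List.length_append, List.length_cons, List.length_nil]
      omega
    · rw [tz_not_dvd m h0 h]
      have := dig_ne_nil m
      cases hd : Nat.toDigits 10 m with
      | nil => exact absurd hd this
      | cons a l => simp

-- the trailing-zero count of the decimal digits is the exact 10-adic valuation
lemma tz_spec (m : Nat) (h0 : m ≠ 0) :
    10 ^ tz (Nat.toDigits 10 m) ∣ m ∧ ¬ 10 ^ (tz (Nat.toDigits 10 m) + 1) ∣ m := by
  induction m using Nat.strong_induction_on with
  | _ m ih =>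
    by_cases h : m % 10 = 0
    · have hm : 10 ≤ m := by
        rcases Nat.lt_or_ge m 10 with h' | h'
        · exact absurd (Nat.mod_eq_of_lt h' ▸ h) h0
        · exact h'
      have hz : m / 10 ≠ 0 := by
        intro hc; have := Nat.div_eq_of_lt (show m < 10 by omega); omega
      have hlt : m / 10 < m := Nat.div_lt_self (by omega) (by norm_num)
      have hdvd : 10 ∣ m := Nat.dvd_of_mod_eq_zero h
      have hmul : 10 * (m / 10) = m := Nat.mul_div_cancel' hdvd
      obtain ⟨ih1, ih2⟩ := ih (m / 10) hlt hz
      rw [tz_dvd m h0 h]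
      constructor
      · have h1 : 10 ^ (tz (Nat.toDigits 10 (m / 10)) + 1) ∣ 10 * (m / 10) := by
          rw [pow_succ']
          exact Nat.mul_dvd_mul_left 10 ih1
        rwa [hmul] at h1
      · intro hc
        apply ih2
        have hc' : 10 * 10 ^ (tz (Nat.toDigits 10 (m / 10)) + 1) ∣ 10 * (m / 10) := by
          rw [hmul, ← pow_succ']
          exact hc
        exact (Nat.mul_dvd_mul_iff_left (by norm_num : 0 < 10)).mp hc'
    · rw [tz_not_dvd m h0 h]
      refine ⟨by simp, ?_⟩
      intro hc
      rw [pow_one] at hc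
      obtain ⟨c, rfl⟩ := hc
      simp [Nat.mul_mod_right] at h

-- len(str(n)) - len(str(n).rstrip('0')) counts the trailing zeros of |n|'s digits
lemma toChars_count (n : Int) :
    (PySem.Int.toChars n).length - (rstrip0 (PySem.Int.toChars n)).length
      = tz (Nat.toDigits 10 n.natAbs) := by
  rw [len_sub_rstrip0]
  simp only [PySem.Int.toChars]
  split_ifs with hn
  · -- negative: str(n) = '-' :: digits; the '-' never belongs to the trailing-zero run
    have hlt := tz_lt_len n.natAbs (by omega)
    simp only [tz, List.reverse_cons, List.takeWhile_append]
    rw [if_neg]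
    intro hc
    rw [List.length_reverse] at hc
    simp only [tz] at hlt
    omega
  · -- nonnegative (and nonzero): str(n) is exactly the digit list
    have : n.toNat = n.natAbs := by omega
    rw [this]

-- A's loop, characterized by the exact 10-adic valuation t of n: with fuel f and counter
-- 9 - f it strips min t f zeros and divides once by that power of ten
lemma caLoop_spec : ∀ (f : Nat), ∀ (n : Int), n ≠ 0 → ∀ (t : Nat),
    (10 : Int) ^ t ∣ n → ¬ (10 : Int) ^ (t + 1) ∣ n →
    caLoop n (9 - (f : Int)) f
      = (PySem.Int.floordiv n (10 ^ min t f), 9 - (f : Int) + (min t f : Int)) := by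
  intro f
  induction f with
  | zero =>
    intro n hn t h10 h11
    simp [caLoop]
  | succ f ih =>
    intro n hn t h10 h11
    cases t with
    | zero =>
      have hnd : ¬ (10 : Int) ∣ n := by simpa using h11
      have hm : ¬ PySem.Int.mod n 10 = 0 := by
        rw [PySem.Int.mod_eq_zero_iff_dvd]; exact hnd
      rw [caLoop, if_neg (fun hc => hm hc.1)]
      simp
      omega
    | succ t =>
      have hdvd : (10 : Int) ∣ n := dvd_trans (dvd_pow_self 10 (Nat.succ_ne_zero t)) h10
      have hmod : PySem.Int.mod n 10 = 0 := by
        rw [PySem.Int.mod_eq_zero_iff_dvd]; exact hdvd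
      have hfd : PySem.Int.floordiv n 10 = n / 10 :=
        PySem.Int.floordiv_eq_ediv_of_pos (by norm_num)
      have he : (9 : Int) - ((f : Int) + 1) < 9 := by
        have : (0 : Int) ≤ (f : Int) := Int.natCast_nonneg f
        omega
      have hn' : n / 10 ≠ 0 := by
        intro hc
        apply hn
        have := Int.ediv_mul_cancel hdvd
        rw [hc] at this; simpa using this.symm
      have h10' : (10 : Int) ^ t ∣ n / 10 := by
        rw [Int.dvd_div_iff_mul_dvd hdvd, ← pow_succ']; exact h10
      have h11' : ¬ (10 : Int) ^ (t + 1) ∣ n / 10 := by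
        rw [Int.dvd_div_iff_mul_dvd hdvd, ← pow_succ']; exact h11
      have hstep : caLoop n (9 - ((f : Int) + 1)) (f + 1)
          = caLoop (PySem.Int.floordiv n 10) (9 - (f : Int)) f := by
        have harg : (9 : Int) - ((f : Int) + 1) + 1 = 9 - (f : Int) := by omega
        rw [caLoop, if_pos ⟨hmod, he⟩, harg]
      have hrec := ih (PySem.Int.floordiv n 10) (by rw [hfd]; exact hn') t
        (by rw [hfd]; exact h10') (by rw [hfd]; exact h11')
      rw [Nat.cast_add, Nat.cast_one, hstep, hrec, Nat.succ_min_succ]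
      have hdiv : PySem.Int.floordiv (PySem.Int.floordiv n 10) (10 ^ min t f)
          = PySem.Int.floordiv n (10 ^ (min t f + 1)) := by
        rw [hfd, PySem.Int.floordiv_eq_ediv_of_pos (by positivity),
            PySem.Int.floordiv_eq_ediv_of_pos (by positivity),
            Int.ediv_ediv_of_nonneg (by norm_num), ← pow_succ']
      rw [hdiv, Prod.mk.injEq]
      exact ⟨rfl, by push_cast; omega⟩

-- divisibility transfer Int ↔ Nat through natAbs
lemma pow_dvd_int_iff (k : Nat) (n : Int) : (10 : Int) ^ k ∣ n ↔ 10 ^ k ∣ n.natAbs := by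
  rw [Int.natCast_dvd_natCast.symm, Int.natCast_pow, Int.dvd_natAbs]
  norm_num

-- ===== VERDICT (by name: the statement is the Claim_ definition above) =====
theorem compress_amount_spec : Claim_equal_compress_amount := by
  intro n _
  unfold Spec_compress_amount compress_amount compress_amount_alt
  by_cases hn : n = 0
  · simp [hn]
  · have hm0 : n.natAbs ≠ 0 := by omega
    obtain ⟨h10, h11⟩ := tz_spec n.natAbs hm0
    have h10' : (10 : Int) ^ tz (Nat.toDigits 10 n.natAbs) ∣ n := (pow_dvd_int_iff _ n).mpr h10
    have h11' : ¬ (10 : Int) ^ (tz (Nat.toDigits 10 n.natAbs) + 1) ∣ n :=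
      fun hc => h11 ((pow_dvd_int_iff _ n).mp hc)
    have hloop := caLoop_spec 9 n hn (tz (Nat.toDigits 10 n.natAbs)) h10' h11'
    norm_num at hloop
    set t := tz (Nat.toDigits 10 n.natAbs) with ht
    -- B's e equals min t 9
    have hle : (rstrip0 (PySem.Int.toChars n)).length ≤ (PySem.Int.toChars n).length :=
      rstrip0_len_le _
    have hcnt := toChars_count n
    have he : min (((PySem.Int.toChars n).length : Int) - ((rstrip0 (PySem.Int.toChars n)).length : Int)) 9
        = ((min t 9 : Nat) : Int) := by
      rw [← ht] at hcnt
      omega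
    simp only [if_neg hn, hloop, he]
    have htoNat : ((min t 9 : Nat) : Int).toNat = min t 9 := by omega
    rw [htoNat,
        PySem.Int.floordiv_eq_ediv_of_pos (show (0:Int) < 10 ^ min t 9 by positivity),
        show ((min t 9 : Nat) : Int) = min (t : Int) 9 by omega]
    have hq := PySem.Int.floordiv_mul_add_mod (n / 10 ^ min t 9) 10
    by_cases hc : min (t : Int) 9 = 9
    · rw [if_neg (by omega), if_pos hc]
      ring
    · rw [if_pos (by omega), if_neg hc]
      omega
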